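-- pv_equiv track=rewrite | github.com/nathantheinventor/solved-problems | CodeForces/Problems/886E Maximum Element/test.py | solve2
-- ===== SOURCE A (Python) =====
-- def solve2(perm, k):
--     tmp = 0
--     m = 0
--     for i in range(len(perm)):
--         if perm[i] > m:
--             tmp = 0
--             m = perm[i]
--         else:
--             tmp += 1
--             if tmp == k:
--                 return m
--     return m
-- ===== SOURCE B (Python) =====
-- def solve2(perm, k):
--     # Decompose perm into a run-length table first: one (record value, length of
--     # the non-record run that follows it) entry per running-max record, with a
--     # virtual initial record 0; then scan the table for the first gap >= k.
--     runs = []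
--     m, gap = 0, 0
--     for x in perm:
--         if x <= m:
--             gap += 1
--         else:
--             runs.append((m, gap))
--             m, gap = x, 0
--     runs.append((m, gap))
--     if k >= 1:
--         for v, g in runs:
--             if g >= k:
--                 return v
--     return m
-- ===== Notes on version B (the rewrite author's own statement) =====
-- stated objective: alternative
-- what changed: A's fused scan with counter and early return is replaced by a two-phase algorithm: first build a run-length table of (running-max record, length of following non-record run), then scan the table for the first record whose gap reaches k.
import Mathlib
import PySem

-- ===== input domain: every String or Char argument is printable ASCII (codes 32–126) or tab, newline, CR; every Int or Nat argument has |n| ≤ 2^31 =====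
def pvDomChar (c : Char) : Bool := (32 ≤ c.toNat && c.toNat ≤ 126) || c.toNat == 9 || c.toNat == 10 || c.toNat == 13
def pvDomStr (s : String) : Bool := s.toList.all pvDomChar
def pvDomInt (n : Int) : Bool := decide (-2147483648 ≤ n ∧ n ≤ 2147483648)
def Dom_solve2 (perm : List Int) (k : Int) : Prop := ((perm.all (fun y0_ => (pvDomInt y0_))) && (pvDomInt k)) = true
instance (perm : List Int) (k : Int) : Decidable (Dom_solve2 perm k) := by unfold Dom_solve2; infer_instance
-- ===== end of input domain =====

-- B replaces A's fused counter-scan with a run-length table build plus a table scan (alternative decomposition, same cost).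


-- ===== PORT A =====
-- A's for-loop over perm with state (tmp, m) and early return when tmp hits k
def solve2Loop (k : Int) : List Int → Int → Int → Int
  | [], _, m => m
  | x :: xs, tmp, m =>
    if x > m then solve2Loop k xs 0 x
    else if tmp + 1 = k then m else solve2Loop k xs (tmp + 1) m

def solve2 (perm : List Int) (k : Int) : Int := solve2Loop k perm 0 0

-- ===== PORT B =====
-- phase 1 of B: build the run-length table (closed runs, current record m, current gap)
def buildRuns : List Int → List (Int × Int) → Int → Int → List (Int × Int) × Int × Int
  | [], runs, m, gap => (runs, m, gap)
  | x :: xs, runs, m, gap =>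
    if x ≤ m then buildRuns xs runs m (gap + 1)
    else buildRuns xs (runs ++ [(m, gap)]) x 0

-- phase 2 of B: the for-loop over the table with its early return
def scanRuns (k : Int) : List (Int × Int) → Option Int
  | [] => none
  | (v, g) :: rest => if g ≥ k then some v else scanRuns k rest

def solve2_alt (perm : List Int) (k : Int) : Int :=
  let r := buildRuns perm [] 0 0
  let runs := r.1 ++ [(r.2.1, r.2.2)]
  if k ≥ 1 then
    match scanRuns k runs with
    | some v => v
    | none => r.2.1
  else r.2.1

-- ===== PRECONDITION & SPEC =====
def Spec_solve2 (perm : List Int) (k : Int) (out : Int) : Prop := out = solve2_alt perm k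
instance (perm : List Int) (k : Int) (out : Int) : Decidable (Spec_solve2 perm k out) := by unfold Spec_solve2; infer_instance

-- ===== CLAIM (what is proved, stated in full; the proofs are below) =====
def Claim_equal_solve2 : Prop := ∀ (perm : List Int) (k : Int), Dom_solve2 perm k → Spec_solve2 perm k (solve2 perm k)

-- ===== LEMMAS AND PROOFS =====

-- accumulator lemma: runs prefix factors out of buildRuns
theorem buildRuns_acc (xs : List Int) (runs : List (Int × Int)) (m gap : Int) :
    buildRuns xs runs m gap =
      ((runs ++ (buildRuns xs [] m gap).1), (buildRuns xs [] m gap).2) := by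
  induction xs generalizing runs m gap with
  | nil => simp [buildRuns]
  | cons x xs ih =>
    by_cases h : x ≤ m
    · simp only [buildRuns, if_pos h]
      exact ih runs m (gap + 1)
    · simp only [buildRuns, if_neg h, List.nil_append]
      rw [ih (runs ++ [(m, gap)]), ih [(m, gap)]]
      simp [List.append_assoc]

-- once the current gap has reached k, B's scan returns the current record m
theorem scan_of_ge (k : Int) (xs : List Int) (m gap : Int) (h : k ≤ gap) :
    scanRuns k ((buildRuns xs [] m gap).1 ++ [((buildRuns xs [] m gap).2.1, (buildRuns xs [] m gap).2.2)]) = some m := by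
  induction xs generalizing m gap with
  | nil => simp [buildRuns, scanRuns, h]
  | cons x xs ih =>
    by_cases hx : x ≤ m
    · simp only [buildRuns, if_pos hx]
      exact ih m (gap + 1) (by omega)
    · simp only [buildRuns, if_neg hx]
      rw [show ([] : List (Int × Int)) ++ [(m, gap)] = [(m, gap)] from rfl, buildRuns_acc xs [(m, gap)]]
      simp [scanRuns, h]

-- main invariant for k ≥ 1: A's loop equals B's table scan (gap = A's tmp, still < k)
theorem main_inv (k : Int) (hk : 1 ≤ k) (xs : List Int) (m gap : Int) (h : gap < k) :
    solve2Loop k xs gap m =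
      (match scanRuns k ((buildRuns xs [] m gap).1 ++ [((buildRuns xs [] m gap).2.1, (buildRuns xs [] m gap).2.2)]) with
       | some v => v
       | none => (buildRuns xs [] m gap).2.1) := by
  induction xs generalizing m gap with
  | nil => simp [buildRuns, scanRuns, solve2Loop, show ¬ (k ≤ gap) by omega]
  | cons x xs ih =>
    by_cases hx : x ≤ m
    · simp only [buildRuns, if_pos hx, solve2Loop, if_neg (show ¬ (m < x) by omega)]
      by_cases hke : gap + 1 = k
      · rw [if_pos hke, scan_of_ge k xs m (gap + 1) (by omega)]
      · rw [if_neg hke]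
        exact ih m (gap + 1) (by omega)
    · simp only [buildRuns, if_neg hx, solve2Loop, if_pos (show m < x by omega)]
      rw [show ([] : List (Int × Int)) ++ [(m, gap)] = [(m, gap)] from rfl, buildRuns_acc xs [(m, gap)]]
      simp only [List.cons_append, List.nil_append, scanRuns, if_neg (show ¬ (k ≤ gap) by omega)]
      exact ih x 0 (by omega)

-- for k ≤ 0, A never returns early and yields the final record value, i.e. buildRuns' final m
theorem nonpos_inv (k : Int) (hk : k < 1) (xs : List Int) (m gap : Int) (h : 0 ≤ gap) :
    solve2Loop k xs gap m = (buildRuns xs [] m gap).2.1 := by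
  induction xs generalizing m gap with
  | nil => simp [buildRuns, solve2Loop]
  | cons x xs ih =>
    by_cases hx : x ≤ m
    · simp only [buildRuns, if_pos hx, solve2Loop, if_neg (show ¬ (m < x) by omega),
        if_neg (show ¬ (gap + 1 = k) by omega)]
      exact ih m (gap + 1) (by omega)
    · simp only [buildRuns, if_neg hx, solve2Loop, if_pos (show m < x by omega)]
      rw [show ([] : List (Int × Int)) ++ [(m, gap)] = [(m, gap)] from rfl, buildRuns_acc xs [(m, gap)]]
      exact ih x 0 (by omega)

-- ===== VERDICT (by name: the statement is the Claim_ definition above) =====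
theorem solve2_spec : Claim_equal_solve2 := by
  intro perm k _
  unfold Spec_solve2 solve2 solve2_alt
  by_cases hk : 1 ≤ k
  · simp only [if_pos hk]
    exact main_inv k hk perm 0 0 (by omega)
  · simp only [if_neg hk]
    exact nonpos_inv k (by omega) perm 0 0 le_rfl
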